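-- pv_equiv track=rewrite | github.com/basakesin/InsectAI-WG3-STSM | Google_Cloud_Demo_App/PyTorch/app.py | remove_classifier_keys
-- ===== SOURCE A (Python) =====
-- def remove_classifier_keys(sd: dict, backbone_name: str) -> dict:
--     sd = sd.copy()
--     # keys to always ignore (final layers)
--     head_keys = []
--     if backbone_name in ("resnet50", "inception_v3"):
--         head_keys += ["fc.weight", "fc.bias"]
--     if backbone_name == "inception_v3":
--         # aux head as well
--         head_keys += ["AuxLogits.fc.weight", "AuxLogits.fc.bias"]
--     if backbone_name in ("mobilenet_v2", "efficientnet_b0"):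
--         head_keys += ["classifier.1.weight", "classifier.1.bias"]
--
--     for k in head_keys:
--         if k in sd:
--             del sd[k]
--     return sd
-- ===== SOURCE B (Python) =====
-- def remove_classifier_keys(sd: dict, backbone_name: str) -> dict:
--     # Decide per KEY whether it is a classifier-head key for this backbone:
--     # no head-key list is ever built; each key is classified by its own pattern,
--     # and a fresh dict is accumulated in a single pass over the items.
--     def dropped(k):
--         if k in ("fc.weight", "fc.bias"):
--             return backbone_name in ("resnet50", "inception_v3")
--         if k in ("AuxLogits.fc.weight", "AuxLogits.fc.bias"):
--             return backbone_name == "inception_v3"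
--         if k in ("classifier.1.weight", "classifier.1.bias"):
--             return backbone_name in ("mobilenet_v2", "efficientnet_b0")
--         return False
--
--     out = {}
--     for k, v in sd.items():
--         if not dropped(k):
--             out[k] = v
--     return out
-- ===== Notes on version B (the rewrite author's own statement) =====
-- stated objective: alternative
-- what changed: A builds a backbone-dependent head-key list and deletes those keys from a copy of the dict; B never builds that list: it classifies each key by its own pattern (a per-key predicate keyed on the key first, the backbone second) and accumulates a fresh dict in a single pass over the items, keeping the non-head entries.
import Mathlib
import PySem

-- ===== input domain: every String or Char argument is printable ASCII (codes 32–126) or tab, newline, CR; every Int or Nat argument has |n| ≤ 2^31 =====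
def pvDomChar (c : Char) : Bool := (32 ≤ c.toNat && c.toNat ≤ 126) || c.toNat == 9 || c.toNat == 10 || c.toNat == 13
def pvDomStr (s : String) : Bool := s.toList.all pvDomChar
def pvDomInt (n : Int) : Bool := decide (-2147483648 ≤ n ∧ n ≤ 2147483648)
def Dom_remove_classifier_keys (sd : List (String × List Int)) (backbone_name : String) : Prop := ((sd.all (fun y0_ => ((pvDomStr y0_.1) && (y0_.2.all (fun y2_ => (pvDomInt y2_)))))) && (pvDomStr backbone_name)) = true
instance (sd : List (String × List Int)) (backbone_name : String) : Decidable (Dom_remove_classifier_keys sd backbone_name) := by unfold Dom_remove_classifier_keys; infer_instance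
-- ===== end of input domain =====

-- B never builds A's head-key list: it classifies each key by its own pattern and
-- accumulates a fresh dict in one pass over the items (alternative decomposition).


-- ===== PORT A =====
-- head_keys built by the same three += steps as the Python
def pvHeadKeys (backbone_name : String) : List String :=
  (if backbone_name = "resnet50" ∨ backbone_name = "inception_v3" then
      ["fc.weight", "fc.bias"] else [])
  ++ (if backbone_name = "inception_v3" then
      ["AuxLogits.fc.weight", "AuxLogits.fc.bias"] else [])
  ++ (if backbone_name = "mobilenet_v2" ∨ backbone_name = "efficientnet_b0" then
      ["classifier.1.weight", "classifier.1.bias"] else [])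

-- 'if k in sd: del sd[k]' on the association list (del removes the entry for k)
def pvDelStep (s : List (String × List Int)) (k : String) : List (String × List Int) :=
  if s.any (fun kv => kv.1 == k) then s.eraseP (fun kv => kv.1 == k) else s

def remove_classifier_keys (sd : List (String × List Int)) (backbone_name : String) : List (String × List Int) :=
  (pvHeadKeys backbone_name).foldl pvDelStep sd

-- ===== PORT B =====
-- Source B's per-key classifier: the key's own pattern decides, the backbone second
def pvDropped (k backbone_name : String) : Bool :=
  if k = "fc.weight" ∨ k = "fc.bias" then
    decide (backbone_name = "resnet50" ∨ backbone_name = "inception_v3")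
  else if k = "AuxLogits.fc.weight" ∨ k = "AuxLogits.fc.bias" then
    decide (backbone_name = "inception_v3")
  else if k = "classifier.1.weight" ∨ k = "classifier.1.bias" then
    decide (backbone_name = "mobilenet_v2" ∨ backbone_name = "efficientnet_b0")
  else false

-- Source B's accumulator loop: 'out = {}; for k, v in sd.items(): if not dropped(k): out[k] = v'
def pvKeepStep (backbone_name : String) (d : PySem.Dict String (List Int))
    (kv : String × List Int) : PySem.Dict String (List Int) :=
  if pvDropped kv.1 backbone_name then d else d.insert kv.1 kv.2

def remove_classifier_keys_alt (sd : List (String × List Int)) (backbone_name : String) : List (String × List Int) :=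
  (sd.foldl (pvKeepStep backbone_name) PySem.Dict.empty).items

-- ===== PRECONDITION & SPEC =====
-- Pre_ excludes association lists with duplicate keys: they do not represent a Python
-- dict (dict(sd) collapses them), so A's first-occurrence deletion there is accidental.
def Pre_remove_classifier_keys (sd : List (String × List Int)) (backbone_name : String) : Prop :=
  (sd.map Prod.fst).Nodup
instance (sd : List (String × List Int)) (backbone_name : String) : Decidable (Pre_remove_classifier_keys sd backbone_name) := by unfold Pre_remove_classifier_keys; infer_instance
def pvWitness_remove_classifier_keys : (List (String × List Int)) × String :=
  ([("fc.weight", [1, 2]), ("layer1.w", [3])], "resnet50")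
def Spec_remove_classifier_keys (sd : List (String × List Int)) (backbone_name : String) (out : List (String × List Int)) : Prop := out = remove_classifier_keys_alt sd backbone_name
instance (sd : List (String × List Int)) (backbone_name : String) (out : List (String × List Int)) : Decidable (Spec_remove_classifier_keys sd backbone_name out) := by unfold Spec_remove_classifier_keys; infer_instance

-- ===== CLAIM (what is proved, stated in full; the proofs are below) =====
def Claim_equal_remove_classifier_keys : Prop := ∀ (sd : List (String × List Int)) (backbone_name : String), Dom_remove_classifier_keys sd backbone_name → Pre_remove_classifier_keys sd backbone_name → Spec_remove_classifier_keys sd backbone_name (remove_classifier_keys sd backbone_name)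

-- ===== LEMMAS AND PROOFS =====

lemma pvDelStep_eq_filter (k : String) (sd : List (String × List Int))
    (h : (sd.map Prod.fst).Nodup) :
    pvDelStep sd k = sd.filter (fun kv => !(kv.1 == k)) := by
  induction sd with
  | nil => simp [pvDelStep]
  | cons a t ih =>
    simp only [List.map_cons, List.nodup_cons] at h
    by_cases hk : a.1 = k
    · subst hk
      have ht : t.filter (fun kv => !(kv.1 == a.1)) = t := by
        apply List.filter_eq_self.2
        intro kv hkv
        simp only [Bool.not_eq_eq_eq_not, Bool.not_true, beq_eq_false_iff_ne, ne_eq]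
        intro he
        exact h.1 (he ▸ List.mem_map_of_mem hkv)
      simp [pvDelStep, ht]
    · have ha : (a.1 == k) = false := by simpa using hk
      have ih' := ih h.2
      unfold pvDelStep at ih' ⊢
      by_cases hany : (t.any fun kv => kv.1 == k) = true
      · rw [if_pos hany] at ih'
        simp [List.any_cons, ha, hany, ih']
      · rw [if_neg hany] at ih'
        simp [List.any_cons, ha, hany, ← ih']

lemma pvFoldl_del_eq_filter (ks : List String) (sd : List (String × List Int))
    (h : (sd.map Prod.fst).Nodup) :
    ks.foldl pvDelStep sd = sd.filter (fun kv => !(ks.contains kv.1)) := by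
  induction ks generalizing sd with
  | nil => simp
  | cons k ks' ih =>
    have h1 : (((sd.filter (fun kv => !(kv.1 == k))).map Prod.fst)).Nodup :=
      List.Nodup.sublist (List.Sublist.map Prod.fst List.filter_sublist) h
    rw [List.foldl_cons, pvDelStep_eq_filter k sd h, ih _ h1, List.filter_filter]
    apply List.filter_congr
    intro kv _
    by_cases h1 : kv.1 = k <;> by_cases h2 : kv.1 ∈ ks' <;>
      simp [h1, h2]

lemma pvContains_headKeys (k bn : String) :
    (pvHeadKeys bn).contains k = pvDropped k bn := by
  unfold pvHeadKeys pvDropped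
  by_cases h1 : bn = "resnet50" ∨ bn = "inception_v3" <;>
  by_cases h2 : bn = "inception_v3" <;>
  by_cases h3 : bn = "mobilenet_v2" ∨ bn = "efficientnet_b0" <;>
  first
  | (exfalso; exact h1 (Or.inr h2))
  | (simp only [h1, h2, h3, if_pos, if_neg, if_true, if_false,
      List.append_nil, List.nil_append, List.contains_append]
     <;> split_ifs with a b c <;>
       first
       | (simp_all [List.contains_eq_mem]; done)
       | (rcases ‹k = _ ∨ k = _› with rfl | rfl <;> simp_all))

lemma pvKeep_items (bn : String) (sd : List (String × List Int))
    (d : PySem.Dict String (List Int)) (hd : d.keys.Nodup)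
    (hsd : (sd.map Prod.fst).Nodup)
    (hdisj : ∀ kv ∈ sd, kv.1 ∉ d.keys) :
    (sd.foldl (pvKeepStep bn) d).items = d.items ++ sd.filter (fun kv => !(pvDropped kv.1 bn)) := by
  induction sd generalizing d with
  | nil => simp
  | cons a t ih =>
    simp only [List.map_cons, List.nodup_cons] at hsd
    by_cases h : pvDropped a.1 bn = true
    · rw [List.foldl_cons]
      have : pvKeepStep bn d a = d := by simp [pvKeepStep, h]
      rw [this, ih d hd hsd.2 (fun kv hkv => hdisj kv (List.mem_cons_of_mem a hkv))]
      simp [h]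
    · rw [List.foldl_cons]
      have hna : d.contains a.1 = false := by
        have := hdisj a (List.mem_cons_self ..)
        simp [PySem.Dict.contains_eq_decide_mem_keys, this]
      have hstep : pvKeepStep bn d a = d.insert a.1 a.2 := by simp [pvKeepStep, h]
      have hkeys : (d.insert a.1 a.2).keys = d.keys ++ [a.1] :=
        PySem.Dict.keys_insert_of_not_contains _ _ hna
      have hnodup' : (d.insert a.1 a.2).keys.Nodup := PySem.Dict.nodup_keys_insert _ _ _ hd
      have hdisj' : ∀ kv ∈ t, kv.1 ∉ (d.insert a.1 a.2).keys := by
        intro kv hkv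
        rw [hkeys]
        simp only [List.mem_append, List.mem_singleton]
        rintro (hmem | heq)
        · exact hdisj kv (List.mem_cons_of_mem a hkv) hmem
        · exact hsd.1 (heq ▸ List.mem_map_of_mem hkv)
      rw [hstep, ih _ hnodup' hsd.2 hdisj',
        PySem.Dict.items_insert_of_not_contains _ _ hna]
      simp [h]

-- ===== VERDICT (by name: the statement is the Claim_ definition above) =====
theorem remove_classifier_keys_spec : Claim_equal_remove_classifier_keys := by
  intro sd bn _ hpre
  unfold Spec_remove_classifier_keys remove_classifier_keys remove_classifier_keys_alt
  rw [pvFoldl_del_eq_filter _ _ hpre,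
    pvKeep_items bn sd PySem.Dict.empty PySem.Dict.nodup_keys_empty hpre (by simp)]
  simp only [PySem.Dict.items, PySem.Dict.empty, List.nil_append]
  apply List.filter_congr
  intro kv _
  rw [pvContains_headKeys]
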